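-- pv_equiv track=rewrite | github.com/CVC-DAG/comref-converter | src/evaluate.py | nest_on_measure_id
-- ===== SOURCE A (Python) =====
-- from typing import Any, Dict, Tuple
--
-- def nest_on_measure_id(
--     input_dict: Dict[Tuple[str, str, str], Any]
-- ) -> Dict[str, Dict[str, Dict[str, Any]]]:
--     output_dict: Dict[str, Dict[str, Dict[str, Any]]] = {}
--     for (name, part, measure), data in input_dict.items():
--         if name in output_dict:
--             if part in output_dict[name]:
--                 output_dict[name][part][measure] = data
--             else:
--                 output_dict[name][part] = {measure: data}
--         else:
--             output_dict[name] = {part: {measure: data}}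
--
--     return output_dict
-- ===== SOURCE B (Python) =====
-- def _group(pairs):
--     """One pass: bucket the rests by key; the dict keeps keys in
--     first-occurrence order and each bucket in original order."""
--     buckets = {}
--     for k, r in pairs:
--         if k in buckets:
--             buckets[k].append(r)
--         else:
--             buckets[k] = [r]
--     return list(buckets.items())
--
--
-- def nest_on_measure_id(input_dict):
--     triples = [(k[0], (k[1], (k[2], v))) for k, v in input_dict.items()]
--     return {name: {part: dict(ms) for part, ms in _group(sub)}
--             for name, sub in _group(triples)}
-- ===== Notes on version B (the rewrite author's own statement) =====
-- stated objective: alternative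
-- what changed: Replaces A's branchy in-place construction of the 3-level nested dict with a flatten-group-rebuild decomposition: a reusable one-pass helper buckets (key, rest) pairs by key in first-occurrence order, applied once on the name field and once per group on the part field, with each innermost group materialised via dict().
import Mathlib
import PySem

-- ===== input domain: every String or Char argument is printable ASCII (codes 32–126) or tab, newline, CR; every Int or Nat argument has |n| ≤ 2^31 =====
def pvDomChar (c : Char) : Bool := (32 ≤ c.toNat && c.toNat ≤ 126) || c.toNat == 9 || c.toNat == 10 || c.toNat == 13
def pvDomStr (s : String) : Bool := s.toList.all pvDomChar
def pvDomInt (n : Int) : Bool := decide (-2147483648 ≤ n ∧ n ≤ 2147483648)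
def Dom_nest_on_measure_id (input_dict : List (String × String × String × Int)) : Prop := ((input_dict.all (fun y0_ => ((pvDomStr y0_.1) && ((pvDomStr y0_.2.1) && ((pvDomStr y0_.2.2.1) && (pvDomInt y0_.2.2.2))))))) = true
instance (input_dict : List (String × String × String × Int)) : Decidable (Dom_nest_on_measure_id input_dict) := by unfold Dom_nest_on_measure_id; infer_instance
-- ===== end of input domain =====

-- B replaces A's branchy single-pass nested-dict insertion by a group-by-first-occurrence
-- partition of the flat items (outer on name, inner on part), an alternative of similar cost.

-- ===== PORT A =====
def nest_on_measure_id (input_dict : List (String × String × String × Int)) : List (String × List (String × List (String × Int))) :=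
  let output_dict : PySem.Dict String (PySem.Dict String (PySem.Dict String Int)) :=
    input_dict.foldl
      (fun od x =>
        let name := x.1; let part := x.2.1; let measure := x.2.2.1; let data := x.2.2.2
        if od.contains name then
          if (od.getD name PySem.Dict.empty).contains part then
            od.insert name ((od.getD name PySem.Dict.empty).insert part
              (((od.getD name PySem.Dict.empty).getD part PySem.Dict.empty).insert measure data))
          else
            od.insert name ((od.getD name PySem.Dict.empty).insert part (PySem.Dict.ofList [(measure, data)]))
        else
          od.insert name (PySem.Dict.ofList [(part, PySem.Dict.ofList [(measure, data)])]))
      PySem.Dict.empty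
  output_dict.items.map (fun g => (g.1, g.2.items.map (fun g2 => (g2.1, g2.2.items))))

-- ===== PORT B =====
-- _group from Source B: one pass bucketing rests by key; keys in first-occurrence order
def pvGroupFold {β : Type} (pairs : List (String × β)) : List (String × List β) :=
  (pairs.foldl
    (fun buckets p =>
      if buckets.contains p.1 then
        buckets.insert p.1 (buckets.getD p.1 [] ++ [p.2])
      else
        buckets.insert p.1 [p.2])
    (PySem.Dict.empty : PySem.Dict String (List β))).items

-- dict(ms) from Source B
def pvDictOf (ms : List (String × Int)) : List (String × Int) :=
  (ms.foldl (fun d p => d.insert p.1 p.2) (PySem.Dict.empty : PySem.Dict String Int)).items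

def nest_on_measure_id_alt (input_dict : List (String × String × String × Int)) : List (String × List (String × List (String × Int))) :=
  let triples := input_dict.map (fun x => (x.1, (x.2.1, (x.2.2.1, x.2.2.2))))
  (pvGroupFold triples).map (fun g =>
    (g.1, (pvGroupFold g.2).map (fun g2 => (g2.1, pvDictOf g2.2))))

-- ===== PRECONDITION & SPEC =====
def Spec_nest_on_measure_id (input_dict : List (String × String × String × Int)) (out : List (String × List (String × List (String × Int)))) : Prop := out = nest_on_measure_id_alt input_dict
instance (input_dict : List (String × String × String × Int)) (out : List (String × List (String × List (String × Int)))) : Decidable (Spec_nest_on_measure_id input_dict out) := by unfold Spec_nest_on_measure_id; infer_instance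

-- ===== CLAIM (what is proved, stated in full; the proofs are below) =====
def Claim_equal_nest_on_measure_id : Prop := ∀ (input_dict : List (String × String × String × Int)), Dom_nest_on_measure_id input_dict → Spec_nest_on_measure_id input_dict (nest_on_measure_id input_dict)

-- ===== LEMMAS AND PROOFS =====

-- proof-side specification of _group's value: recursive first-occurrence partition
def pvGroup {β : Type} : List (String × β) → List (String × List β)
  | [] => []
  | (k0, b) :: t =>
    (k0, (((k0, b) :: t).filter (fun p => p.1 == k0)).map (·.2)) ::
    pvGroup (((k0, b) :: t).filter (fun p => !(p.1 == k0)))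
termination_by l => l.length
decreasing_by
  simp only [List.filter_cons, beq_self_eq_true, Bool.not_true]
  exact Nat.lt_succ_of_le (List.length_filter_le _ _)

-- generic "group-insert" step: d[x.1] = up(d.get(x.1, e), x.2), overwrite keeps position
def pvGStep {β γ : Type} (up : γ → β → γ) (e : γ) (d : PySem.Dict String γ) (x : String × β) : PySem.Dict String γ :=
  d.insert x.1 (up (d.getD x.1 e) x.2)

-- the invariant of the generic fold over an arbitrary accumulator with unique keys
theorem pvGfold_items {β γ : Type} (up : γ → β → γ) (e : γ) :
    ∀ (t : List (String × β)) (d : PySem.Dict String γ), d.keys.Nodup →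
      (t.foldl (pvGStep up e) d).items
        = d.items.map (fun p => (p.1, ((t.filter (fun y => y.1 == p.1)).map (·.2)).foldl up p.2))
          ++ (pvGroup (t.filter (fun y => !(d.contains y.1)))).map (fun g => (g.1, g.2.foldl up e)) := by
  intro t
  induction t with
  | nil =>
    intro d hd
    simp [pvGroup]
  | cons x t ih =>
    intro d hd
    obtain ⟨k, b⟩ := x
    rw [List.foldl_cons]
    by_cases hc : d.contains k = true
    · rw [show pvGStep up e d (k, b) = d.insert k (up (d.getD k e) b) from rfl,
          ih _ (PySem.Dict.nodup_keys_insert d k _ hd)]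
      congr 1
      · -- first summand
        rw [PySem.Dict.items_insert_of_contains d _ hc, List.map_map]
        apply List.map_congr_left
        intro p hp
        by_cases hpk : p.1 = k
        · obtain ⟨p1, p2⟩ := p
          simp only at hpk; subst hpk
          have hget : d.getD p1 e = p2 := PySem.Dict.getD_of_mem_items d hp hd e
          simp [hget]
        · have hkp : (k == p.1) = false := beq_eq_false_iff_ne.mpr (fun h => hpk h.symm)
          simp [hkp, hpk]
      · -- second summand
        congr 2
        simp only [PySem.Dict.contains_insert]
        rw [List.filter_cons]
        simp only [hc, Bool.not_true, Bool.false_eq_true, if_false]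
        apply List.filter_congr
        intro y _
        by_cases hyk : y.1 = k
        · simp [hyk, hc]
        · simp [hyk]
    · have hc' : d.contains k = false := by simpa using hc
      rw [show pvGStep up e d (k, b) = d.insert k (up (d.getD k e) b) from rfl,
          ih _ (PySem.Dict.nodup_keys_insert d k _ hd),
          PySem.Dict.items_insert_of_not_contains d _ hc',
          PySem.Dict.getD_of_not_contains d e hc']
      rw [List.map_append, List.append_assoc]
      -- RHS group side
      have hfc : ((k, b) :: t).filter (fun y => !(d.contains y.1))
          = (k, b) :: t.filter (fun y => !(d.contains y.1)) := by
        simp [hc']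
      rw [hfc, pvGroup]
      -- now massage
      have hfilter1 : ((t.filter (fun y => !(d.contains y.1))).filter (fun p => p.1 == k))
          = t.filter (fun y => y.1 == k) := by
        rw [List.filter_filter]
        apply List.filter_congr
        intro y _
        by_cases hyk : y.1 = k
        · subst hyk; simp [hc']
        · simp [hyk]
      have hfilter2 : ((t.filter (fun y => !(d.contains y.1))).filter (fun p => !(p.1 == k)))
          = t.filter (fun y => !((d.insert k (up e b)).contains y.1)) := by
        rw [List.filter_filter]
        apply List.filter_congr
        intro y _
        simp only [PySem.Dict.contains_insert]
        by_cases hyk : y.1 = k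
        · subst hyk; simp
        · simp
      rw [List.map_cons]
      congr 1
      · -- d.items part
        apply List.map_congr_left
        intro p hp
        have hpk : p.1 ≠ k := by
          intro h
          have hm := PySem.Dict.mem_keys_of_mem_items d hp
          rw [h] at hm
          rw [(PySem.Dict.contains_iff_mem_keys d k).2 hm] at hc'
          exact Bool.true_eq_false.mp hc'
        have hkp : (k == p.1) = false := beq_eq_false_iff_ne.mpr (fun h => hpk h.symm)
        simp [hkp]
      · -- appended singleton ++ recursive group
        rw [List.map_cons]
        simp [hfilter1, hfilter2]

theorem pvGfold_items_empty {β γ : Type} (up : γ → β → γ) (e : γ) (l : List (String × β)) :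
    (l.foldl (pvGStep up e) (PySem.Dict.empty : PySem.Dict String γ)).items
      = (pvGroup l).map (fun g => (g.1, g.2.foldl up e)) := by
  have h := pvGfold_items up e l PySem.Dict.empty (by simp [pysem])
  simpa [PySem.Dict.contains_empty, List.filter_true] using h

-- A's loop body in uniform pvGStep form
theorem stepA_eq (od : PySem.Dict String (PySem.Dict String (PySem.Dict String Int)))
    (x : String × String × String × Int) :
    (let name := x.1; let part := x.2.1; let measure := x.2.2.1; let data := x.2.2.2
      if od.contains name then
        if (od.getD name PySem.Dict.empty).contains part then
          od.insert name ((od.getD name PySem.Dict.empty).insert part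
            (((od.getD name PySem.Dict.empty).getD part PySem.Dict.empty).insert measure data))
        else
          od.insert name ((od.getD name PySem.Dict.empty).insert part (PySem.Dict.ofList [(measure, data)]))
      else
        od.insert name (PySem.Dict.ofList [(part, PySem.Dict.ofList [(measure, data)])]))
    = pvGStep (pvGStep (fun d3 z => d3.insert z.1 z.2) PySem.Dict.empty) PySem.Dict.empty od x := by
  simp only [pvGStep]
  split_ifs with h1 h2
  · rfl
  · rw [PySem.Dict.getD_of_not_contains (od.getD x.1 PySem.Dict.empty) _ (by simpa using h2)]
    rfl
  · rw [PySem.Dict.getD_of_not_contains od _ (by simpa using h1)]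
    rfl


-- B's one-pass bucket fold computes exactly the recursive partition pvGroup
theorem pvGroupFold_eq {β : Type} (pairs : List (String × β)) :
    pvGroupFold pairs = pvGroup pairs := by
  unfold pvGroupFold
  have hstep : (fun (buckets : PySem.Dict String (List β)) (p : String × β) =>
      if buckets.contains p.1 then
        buckets.insert p.1 (buckets.getD p.1 [] ++ [p.2])
      else
        buckets.insert p.1 [p.2])
      = pvGStep (fun a r => a ++ [r]) [] := by
    funext d p
    simp only [pvGStep]
    split_ifs with h
    · rfl
    · rw [PySem.Dict.getD_of_not_contains d [] (by simpa using h), List.nil_append]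
  rw [hstep, pvGfold_items_empty]
  have hid : (fun (g : String × List β) => (g.1, g.2.foldl (fun a r => a ++ [r]) [])) = fun g => g := by
    funext g
    rw [PySem.List.foldl_append_singleton, List.nil_append]
  rw [hid]
  exact List.map_id' _

-- ===== VERDICT (by name: the statement is the Claim_ definition above) =====
theorem nest_on_measure_id_spec : Claim_equal_nest_on_measure_id := by
  intro l _
  unfold Spec_nest_on_measure_id
  simp only [nest_on_measure_id, nest_on_measure_id_alt, pvGroupFold_eq]
  have hstep : (fun (od : PySem.Dict String (PySem.Dict String (PySem.Dict String Int)))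
      (x : String × String × String × Int) =>
        if od.contains x.1 then
          if (od.getD x.1 PySem.Dict.empty).contains x.2.1 then
            od.insert x.1 ((od.getD x.1 PySem.Dict.empty).insert x.2.1
              (((od.getD x.1 PySem.Dict.empty).getD x.2.1 PySem.Dict.empty).insert x.2.2.1 x.2.2.2))
          else
            od.insert x.1 ((od.getD x.1 PySem.Dict.empty).insert x.2.1 (PySem.Dict.ofList [(x.2.2.1, x.2.2.2)]))
        else
          od.insert x.1 (PySem.Dict.ofList [(x.2.1, PySem.Dict.ofList [(x.2.2.1, x.2.2.2)])]))
      = pvGStep (pvGStep (fun d3 z => d3.insert z.1 z.2) PySem.Dict.empty) PySem.Dict.empty :=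
    funext fun od => funext fun x => stepA_eq od x
  rw [hstep, pvGfold_items_empty, List.map_map]
  have hl : l.map (fun x => (x.1, (x.2.1, (x.2.2.1, x.2.2.2)))) = l := by simp
  rw [hl]
  apply List.map_congr_left
  intro g _
  simp only [Function.comp]
  congr 1
  rw [pvGfold_items_empty, List.map_map]
  apply List.map_congr_left
  intro g2 _
  rfl
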